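-- pv_equiv track=rewrite | github.com/Vechtomov/stepik-algorithms-course | different_addendums.py | get_different_addendums
-- ===== SOURCE A (Python) =====
-- def get_different_addendums(n):
--     result, i = [], 1
--     while n > 0:
--         addendum = i if n - i > i else n
--         n -= addendum
--         result.append(addendum)
--         i += 1
--     return result
-- ===== SOURCE B (Python) =====
-- def get_different_addendums(n):
--     if n <= 0:
--         return []
--     # binary search for the smallest m >= 1 with m*(m+3)//2 >= n
--     lo, hi = 1, n
--     while lo < hi:
--         mid = (lo + hi) // 2
--         if mid * (mid + 3) // 2 >= n:
--             hi = mid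
--         else:
--             lo = mid + 1
--     m = lo
--     return list(range(1, m)) + [n - (m - 1) * m // 2]
-- ===== Notes on version B (the rewrite author's own statement) =====
-- stated objective: alternative
-- what changed: Replaces A's one-element-per-iteration greedy loop by a binary search for the stopping index m (smallest m with m*(m+3)//2 >= n) followed by a single list(range(1,m)) + [remainder] construction.
import Mathlib
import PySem

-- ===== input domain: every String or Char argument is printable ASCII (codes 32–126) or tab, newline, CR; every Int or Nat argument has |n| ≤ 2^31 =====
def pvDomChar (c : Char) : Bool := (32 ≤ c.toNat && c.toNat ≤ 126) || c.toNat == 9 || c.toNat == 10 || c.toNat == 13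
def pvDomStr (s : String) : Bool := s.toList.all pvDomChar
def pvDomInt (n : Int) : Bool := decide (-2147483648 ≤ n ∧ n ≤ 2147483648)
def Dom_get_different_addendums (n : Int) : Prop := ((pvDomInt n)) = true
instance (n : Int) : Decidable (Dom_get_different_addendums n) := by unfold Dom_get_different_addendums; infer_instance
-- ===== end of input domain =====

-- B replaces A's element-by-element greedy loop by a binary search for the stopping
-- index m and one range construction (objective: alternative algorithm).

-- ===== PORT A =====
-- the while loop of A; fuel = n.toNat suffices since each iteration removes ≥ 1 from n
def pvLoopA : Nat → Int → Int → List Int → List Int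
  | 0, _, _, result => result
  | fuel + 1, n, i, result =>
    if n > 0 then
      let addendum := if n - i > i then i else n
      pvLoopA fuel (n - addendum) (i + 1) (result ++ [addendum])
    else result

def get_different_addendums (n : Int) : List Int :=
  pvLoopA n.toNat n 1 []

-- ===== PORT B =====
-- smallest m in [lo, hi] with m*(m+3)//2 >= n, by binary search (B's while loop)
def pvBsearch (n lo hi : Int) : Int :=
  if h : lo < hi then
    let mid := PySem.Int.floordiv (lo + hi) 2
    if PySem.Int.floordiv (mid * (mid + 3)) 2 ≥ n then
      pvBsearch n lo mid
    else
      pvBsearch n (mid + 1) hi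
  else lo
termination_by (hi - lo).toNat
decreasing_by
  · have hlt : PySem.Int.floordiv (lo + hi) 2 < hi := by
      rw [PySem.Int.floordiv_lt_iff_lt_mul (by omega : (0:Int) < 2)]; omega
    omega
  · have hb := PySem.Int.floordiv_two_mid_bounds (le_of_lt h)
    omega

def get_different_addendums_alt (n : Int) : List Int :=
  if n ≤ 0 then []
  else
    let m := pvBsearch n 1 n
    PySem.List.pyRange 1 m 1 ++ [n - PySem.Int.floordiv ((m - 1) * m) 2]

-- ===== PRECONDITION & SPEC =====
def Spec_get_different_addendums (n : Int) (out : List Int) : Prop := out = get_different_addendums_alt n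
instance (n : Int) (out : List Int) : Decidable (Spec_get_different_addendums n out) := by unfold Spec_get_different_addendums; infer_instance

-- ===== CLAIM (what is proved, stated in full; the proofs are below) =====
def Claim_equal_get_different_addendums : Prop := ∀ (n : Int), Dom_get_different_addendums n → Spec_get_different_addendums n (get_different_addendums n)

-- ===== LEMMAS AND PROOFS =====

lemma pvLoopA_nonpos (fuel : Nat) (n i : Int) (acc : List Int) (h : ¬ n > 0) :
    pvLoopA fuel n i acc = acc := by
  cases fuel with
  | zero => rfl
  | succ f => simp [pvLoopA, h]

-- main loop invariant: from remaining R at index i (with 2R = 2N - (i-1)i),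
-- A's loop appends i, i+1, …, m-1 and then the remainder, where m is the least
-- index with m(m+3) ≥ 2N.
lemma pvLoopA_eq (fuel : Nat) : ∀ (N i m R F : Int) (acc : List Int),
    1 ≤ N → 1 ≤ i → i ≤ m →
    2 * R = 2 * N - (i - 1) * i →
    2 * F = 2 * N - (m - 1) * m →
    (∀ j : Int, 1 ≤ j → j < m → j * (j + 3) < 2 * N) →
    2 * N ≤ m * (m + 3) →
    R ≤ (fuel : Int) →
    pvLoopA fuel R i acc = acc ++ PySem.List.pyRange i m 1 ++ [F] := by
  induction fuel with
  | zero =>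
    intro N i m R F acc hN hi him hR hF hlt hm hfuel
    exfalso
    have hRpos : 0 < R := by
      rcases eq_or_lt_of_le hi with h1 | h2
      · -- i = 1 : R = N ≥ 1
        have h0 : (i - 1) * i = 0 := by rw [← h1]; ring
        omega
      · have := hlt (i - 1) (by omega) (by omega)
        nlinarith
    simp at hfuel; omega
  | succ f ih =>
    intro N i m R F acc hN hi him hR hF hlt hm hfuel
    have hRpos : 0 < R := by
      rcases eq_or_lt_of_le hi with h1 | h2
      · have h0 : (i - 1) * i = 0 := by rw [← h1]; ring
        omega
      · have := hlt (i - 1) (by omega) (by omega)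
        nlinarith
    rcases eq_or_lt_of_le him with heq | hlt_im
    · -- i = m : last iteration, append the remainder R (= F)
      subst heq
      have hle : ¬ (R - i > i) := by nlinarith
      have hRF : R = F := by omega
      simp only [pvLoopA, if_pos hRpos, if_neg hle]
      rw [pvLoopA_nonpos _ _ _ _ (by omega)]
      rw [PySem.List.pyRange_one_eq_nil (le_refl i)]
      simp [hRF]
    · -- i < m : append i and continue
      have hcond : R - i > i := by
        have := hlt i (by omega) hlt_im
        nlinarith
      simp only [pvLoopA, if_pos hRpos, if_pos hcond]
      rw [ih N (i + 1) m (R - i) F (acc ++ [i]) hN (by omega) (by omega)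
            (by ring_nf; ring_nf at hR; omega) hF hlt hm (by push_cast at hfuel; omega)]
      rw [PySem.List.pyRange_one_cons hlt_im]
      simp

-- binary-search correctness: pvBsearch n lo hi is the least index in [lo, hi]
-- satisfying m(m+3) ≥ 2n, provided hi satisfies it.
lemma pvBsearch_spec : ∀ (k : Nat) (n lo hi : Int), (hi - lo).toNat = k →
    1 ≤ lo → lo ≤ hi → 2 * n ≤ hi * (hi + 3) →
    (lo ≤ pvBsearch n lo hi ∧ pvBsearch n lo hi ≤ hi ∧
     2 * n ≤ pvBsearch n lo hi * (pvBsearch n lo hi + 3) ∧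
     ∀ j : Int, lo ≤ j → j < pvBsearch n lo hi → j * (j + 3) < 2 * n) := by
  intro k
  induction k using Nat.strong_induction_on with
  | _ k ih =>
    intro n lo hi hk h1 hlohi hPhi
    rcases eq_or_lt_of_le hlohi with heq | hlt
    · subst heq
      rw [pvBsearch, dif_neg (lt_irrefl lo)]
      exact ⟨le_refl lo, le_refl lo, hPhi, fun j hj1 hj2 => absurd (lt_of_le_of_lt hj1 hj2) (lt_irrefl lo)⟩
    · rw [pvBsearch, dif_pos hlt]
      have hb := PySem.Int.floordiv_two_mid_bounds (le_of_lt hlt)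
      have hmidlt : PySem.Int.floordiv (lo + hi) 2 < hi := by
        rw [PySem.Int.floordiv_lt_iff_lt_mul (by omega : (0:Int) < 2)]; omega
      set mid := PySem.Int.floordiv (lo + hi) 2 with hmid
      have hcond : (PySem.Int.floordiv (mid * (mid + 3)) 2 ≥ n) ↔ 2 * n ≤ mid * (mid + 3) := by
        rw [ge_iff_le, PySem.Int.le_floordiv_iff_mul_le (by omega : (0:Int) < 2)]
        constructor <;> intro h <;> omega
      by_cases hP : 2 * n ≤ mid * (mid + 3)
      · rw [if_pos (hcond.mpr hP)]
        exact (ih (mid - lo).toNat (by omega) n lo mid rfl h1 (by omega) hP).imp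
          id (fun h => ⟨by omega, h.2.1, h.2.2⟩)
      · rw [if_neg (fun h => hP (hcond.mp h))]
        obtain ⟨ha, hb', hc, hd⟩ := ih (hi - (mid + 1)).toNat (by omega) n (mid + 1) hi rfl
          (by omega) (by omega) hPhi
        refine ⟨by omega, hb', hc, fun j hj1 hj2 => ?_⟩
        by_cases hjm : j ≤ mid
        · -- monotonicity: j ≤ mid and mid fails ⇒ j fails
          have : j * (j + 3) ≤ mid * (mid + 3) := by nlinarith
          omega
        · exact hd j (by omega) hj2

theorem get_different_addendums_spec_aux (n : Int) :
    get_different_addendums n = get_different_addendums_alt n := by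
  by_cases hn : n ≤ 0
  · rw [get_different_addendums, get_different_addendums_alt, if_pos hn,
      pvLoopA_nonpos _ _ _ _ (by omega)]
  · have hn' : 0 < n := by omega
    obtain ⟨ha, hb, hc, hd⟩ := pvBsearch_spec (n - 1).toNat n 1 n (by omega) (le_refl 1)
      (by omega) (by nlinarith)
    set m := pvBsearch n 1 n with hm
    -- the final element: (m-1)*m is even
    have heven : ∃ k : Int, (m - 1) * m = 2 * k := by
      rcases Int.even_or_odd m with ⟨t, ht⟩ | ⟨t, ht⟩
      · exact ⟨(m - 1) * t, by rw [ht]; ring⟩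
      · exact ⟨t * m, by rw [ht]; ring⟩
    obtain ⟨k, hk⟩ := heven
    have hfd : PySem.Int.floordiv ((m - 1) * m) 2 = k := by
      rw [PySem.Int.floordiv_eq_iff_of_pos (by omega : (0:Int) < 2)]; omega
    have halt : get_different_addendums_alt n = PySem.List.pyRange 1 m 1 ++ [n - k] := by
      simp only [get_different_addendums_alt, if_neg hn, ← hm, hfd]
    rw [halt, get_different_addendums]
    refine (pvLoopA_eq n.toNat n 1 m n (n - k) [] hn' (le_refl 1) ha (by ring)
      (by omega) (fun j hj1 hj2 => hd j hj1 hj2) hc (by omega)).trans ?_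
    simp

-- ===== VERDICT (by name: the statement is the Claim_ definition above) =====
theorem get_different_addendums_spec : Claim_equal_get_different_addendums := by
  intro n _
  exact get_different_addendums_spec_aux n
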